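-- pv_equiv track=rewrite | github.com/ElNiak/PANTHER-Ivy | ivy_analysis_mixin.py | _check_error_patterns
-- ===== SOURCE A (Python) =====
-- from typing import Any, Dict, List, Optional, Tuple
--
-- def _check_error_patterns(stderr_content: str) -> List[str]:
--     """
--     Check stderr for error patterns.
--
--     Args:
--         stderr_content: Content of stderr
--
--     Returns:
--         List of error messages found
--     """
--     error_patterns = [
--         "No such file or directory",
--         "timeout: failed to run command",
--         "error:",
--         "Error:",
--         "ERROR:",
--         "failed:",
--         "Failed:",
--         "FAILED:",
--     ]
--
--     errors = []
--     for pattern in error_patterns: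
--         if pattern in stderr_content:
--             # Extract the line containing the error
--             for line in stderr_content.split("\n"):
--                 if pattern in line:
--                     errors.append(line.strip())
--                     break
--
--     return errors
-- ===== SOURCE B (Python) =====
-- def _check_error_patterns(stderr_content: str):
--     """Single pass over the lines: record the first matching stripped line per
--     pattern in a dict, then emit in pattern order."""
--     error_patterns = [
--         "No such file or directory",
--         "timeout: failed to run command",
--         "error:",
--         "Error:",
--         "ERROR:",
--         "failed:",
--         "Failed:",
--         "FAILED:",
--     ]
--     found = {}
--     for line in stderr_content.split("\n"):
--         for pattern in error_patterns:
--             if pattern not in found and pattern in line: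
--                 found[pattern] = line.strip()
--     return [found[p] for p in error_patterns if p in found]
-- ===== Notes on version B (the rewrite author's own statement) =====
-- stated objective: alternative
-- what changed: Replaced A's per-pattern rescans (substring test on the whole stderr, then a fresh split and scan of the lines for each pattern) by one split and one forward pass over the lines filling a dict pattern -> first matching stripped line, then an ordered emit over the pattern list.
import Mathlib
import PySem

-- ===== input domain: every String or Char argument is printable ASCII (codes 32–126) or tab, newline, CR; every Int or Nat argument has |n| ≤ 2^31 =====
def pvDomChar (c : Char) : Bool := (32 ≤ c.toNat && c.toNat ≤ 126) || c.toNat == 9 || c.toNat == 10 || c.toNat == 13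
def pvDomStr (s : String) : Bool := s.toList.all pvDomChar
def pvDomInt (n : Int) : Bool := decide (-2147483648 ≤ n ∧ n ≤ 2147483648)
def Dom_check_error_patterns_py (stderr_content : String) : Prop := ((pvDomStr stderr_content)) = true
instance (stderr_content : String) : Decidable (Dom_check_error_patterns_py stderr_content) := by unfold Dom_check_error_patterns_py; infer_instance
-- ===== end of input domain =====

-- B replaces A's per-pattern rescans (substring test on the whole stderr, then a
-- fresh split and scan of the lines for each pattern) with one split and one
-- forward pass filling a dict pattern -> first matching stripped line, then an
-- ordered emit over the pattern list (objective: alternative; same result).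

-- ===== PORT A =====
def pvErrorPatterns : List String :=
  ["No such file or directory", "timeout: failed to run command",
   "error:", "Error:", "ERROR:", "failed:", "Failed:", "FAILED:"]

-- A's inner 'for line in split: if pattern in line: append(line.strip()); break'
def pvFirstMatchA (pattern : String) (lines errors : List String) : List String :=
  match lines with
  | [] => errors
  | line :: rest =>
    if PySem.Str.isIn pattern line then errors ++ [PySem.Str.strip line]
    else pvFirstMatchA pattern rest errors

def check_error_patterns_py (stderr_content : String) : List String :=
  pvErrorPatterns.foldl (fun errors pattern =>
    if PySem.Str.isIn pattern stderr_content then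
      pvFirstMatchA pattern ((PySem.Str.split? stderr_content "\n").getD []) errors
    else errors) []

-- ===== PORT B =====
def check_error_patterns_py_alt (stderr_content : String) : List String :=
  let lines := (PySem.Str.split? stderr_content "\n").getD []
  let found : PySem.Dict String String :=
    lines.foldl (fun found line =>
      pvErrorPatterns.foldl (fun found pattern =>
        if !found.contains pattern && PySem.Str.isIn pattern line then
          found.insert pattern (PySem.Str.strip line)
        else found) found) PySem.Dict.empty
  pvErrorPatterns.foldl (fun out pattern =>
    match found.get? pattern with
    | some line => out ++ [line]
    | none => out) []

-- ===== PRECONDITION & SPEC =====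
def Spec_check_error_patterns_py (stderr_content : String) (out : List String) : Prop := out = check_error_patterns_py_alt stderr_content
instance (stderr_content : String) (out : List String) : Decidable (Spec_check_error_patterns_py stderr_content out) := by unfold Spec_check_error_patterns_py; infer_instance

-- ===== CLAIM (what is proved, stated in full; the proofs are below) =====
def Claim_equal_check_error_patterns_py : Prop := ∀ (stderr_content : String), Dom_check_error_patterns_py stderr_content → Spec_check_error_patterns_py stderr_content (check_error_patterns_py stderr_content)

-- ===== LEMMAS AND PROOFS =====

-- A's inner loop is 'first matching line, stripped and appended'
theorem pvFirstMatchA_eq (p : String) (lines errors : List String) :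
    pvFirstMatchA p lines errors =
      match lines.find? (fun l => PySem.Str.isIn p l) with
      | some l => errors ++ [PySem.Str.strip l]
      | none => errors := by
  induction lines with
  | nil => rfl
  | cons line rest ih =>
    rw [pvFirstMatchA, List.find?_cons]
    cases h : PySem.Str.isIn p line <;> simp [ih]

-- every piece produced by splitOn is a contiguous substring of the input
theorem pv_go_infix (sep : List Char) (s : List Char) :
    ∀ (fuel : Nat) (l cur : List Char) (acc : List (List Char)),
      (∀ a ∈ acc, a <:+: s) → (cur.reverse ++ l) <:+: s →
      ∀ x ∈ PySem.Chars.splitOn.go sep fuel l cur acc, x <:+: s := by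
  intro fuel
  induction fuel with
  | zero =>
    intro l cur acc hacc hcl x hx
    rw [PySem.Chars.splitOn.go.eq_def] at hx
    simp at hx
    rcases hx with h | h
    · exact hacc x h
    · exact h ▸ hcl
  | succ fuel ih =>
    intro l cur acc hacc hcl x hx
    rw [PySem.Chars.splitOn.go.eq_def] at hx
    cases l with
    | nil =>
      simp at hx
      rcases hx with h | h
      · exact hacc x h
      · subst h; simpa using hcl
    | cons c rest =>
      have hcr : cur.reverse <:+: s :=
        List.IsInfix.trans ⟨[], c :: rest, by simp⟩ hcl
      by_cases hp : sep.isPrefixOf (c :: rest) = true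
      · simp only [hp, if_true] at hx
        refine ih _ [] _ ?_ ?_ x hx
        · intro a ha
          rcases List.mem_cons.mp ha with h | h
          · exact h ▸ hcr
          · exact hacc a h
        · have h1 : List.drop sep.length (c :: rest) <:+: (c :: rest) :=
            (List.drop_suffix _ _).isInfix
          have h2 : (c :: rest) <:+: s := List.IsInfix.trans ⟨cur.reverse, [], by simp⟩ hcl
          simpa using h1.trans h2
      · simp only [hp] at hx
        refine ih _ _ _ hacc ?_ x hx
        simpa using hcl

theorem pv_splitOn_infix (cs sep x : List Char) (hx : x ∈ PySem.Chars.splitOn cs sep) :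
    x <:+: cs := by
  unfold PySem.Chars.splitOn at hx
  exact pv_go_infix sep cs _ cs [] [] (by simp) (by simp) x hx

-- a line of s.split("\n") containing p forces p to be a substring of s
theorem pv_isIn_of_line (s p line : String)
    (hline : line ∈ (PySem.Str.split? s "\n").getD [])
    (hp : PySem.Str.isIn p line = true) : PySem.Str.isIn p s = true := by
  have hsplit : PySem.Str.split? s "\n" = some ((PySem.Chars.splitOn s.toList ['\n']).map String.ofList) := by
    simp [PySem.Str.split?, PySem.Chars.split?]
  rw [hsplit] at hline
  simp only [Option.getD_some, List.mem_map] at hline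
  obtain ⟨cs, hcs, hofs⟩ := hline
  have hinf : cs <:+: s.toList := pv_splitOn_infix _ _ _ hcs
  rw [PySem.Str.isIn_eq, PySem.Chars.isIn_iff_infix] at hp ⊢
  have hl : line.toList = cs := by subst hofs; simp
  rw [hl] at hp
  exact hp.trans hinf

-- the inner fold over the pattern list: effect on one key
theorem pv_inner_get (p line : String) :
    ∀ (ps : List String) (d : PySem.Dict String String),
      (ps.foldl (fun found pattern =>
          if !found.contains pattern && PySem.Str.isIn pattern line then
            found.insert pattern (PySem.Str.strip line)
          else found) d).get? p =
        match d.get? p with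
        | some v => some v
        | none => if p ∈ ps ∧ PySem.Str.isIn p line then some (PySem.Str.strip line) else none := by
  intro ps
  induction ps with
  | nil => intro d; cases h : d.get? p <;> simp [h]
  | cons q rest ih =>
    intro d
    rw [List.foldl_cons, ih]
    by_cases hq : p = q
    · subst hq
      cases hd : d.get? p with
      | some v =>
        have hc : d.contains p = true := by simp [PySem.Dict.contains_eq_isSome_get?, hd]
        simp [hc, hd]
      | none =>
        have hc : d.contains p = false := by simp [PySem.Dict.contains_eq_isSome_get?, hd]
        cases hiq : PySem.Chars.isIn p.toList line.toList with
        | true => simp [hc, hiq, PySem.Str.isIn_eq, PySem.Dict.get?_insert_self]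
        | false => simp [hc, hd, hiq, PySem.Str.isIn_eq]
    · have hget : ((if !d.contains q && PySem.Str.isIn q line then
            d.insert q (PySem.Str.strip line) else d).get? p) = d.get? p := by
        split
        · rw [PySem.Dict.get?_insert]; simp [hq]
        · rfl
      rw [hget]
      cases hd : d.get? p <;> simp [hq]

-- the outer single pass: the dict maps each pattern to its first matching line, stripped
theorem pv_found_get (p : String) (hp : p ∈ pvErrorPatterns) :
    ∀ (lines : List String) (d : PySem.Dict String String),
      (lines.foldl (fun found line =>
          pvErrorPatterns.foldl (fun found pattern =>
            if !found.contains pattern && PySem.Str.isIn pattern line then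
              found.insert pattern (PySem.Str.strip line)
            else found) found) d).get? p =
        match d.get? p with
        | some v => some v
        | none => (lines.find? (fun l => PySem.Str.isIn p l)).map PySem.Str.strip := by
  intro lines
  induction lines with
  | nil => intro d; cases h : d.get? p <;> simp [h]
  | cons line rest ih =>
    intro d
    rw [List.foldl_cons, ih, pv_inner_get]
    cases hd : d.get? p with
    | some v => simp
    | none =>
      cases hiq : PySem.Chars.isIn p.toList line.toList with
      | true => simp [hiq, hp, PySem.Str.isIn_eq]
      | false => simp [hiq, hp, PySem.Str.isIn_eq]

-- ===== VERDICT (by name: the statement is the Claim_ definition above) =====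
theorem check_error_patterns_py_spec : Claim_equal_check_error_patterns_py := by
  intro s _
  unfold Spec_check_error_patterns_py check_error_patterns_py check_error_patterns_py_alt
  refine PySem.List.foldl_congr_mem' _ _ _ _ ?_
  intro p hp errors
  rw [pvFirstMatchA_eq, pv_found_get p hp, PySem.Dict.get?_empty]
  cases hf : ((PySem.Str.split? s "\n").getD []).find? (fun l => PySem.Str.isIn p l) with
  | none =>
    simp only [Option.map_none]
    split <;> rfl
  | some l =>
    have hmem := List.mem_of_find?_eq_some hf
    have hl := List.find?_some hf
    rw [pv_isIn_of_line s p l hmem hl]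
    simp
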